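-- pv_equiv track=rewrite | github.com/Xiretza/codestuff | whitespace/whitespace.py | consume_any
-- ===== SOURCE A (Python) =====
-- def consume_any(code, choices, offset=0):
--     """
--     seek from position 'offset' of code until a match in choices is found
--     return (matched choice, position after match)
--
--     >>> whitespace.consume_any('abcdef', ['bcd', 'ab', 'a'], 0)
--     ('a', 1)
--     >>> whitespace.consume_any('abcdef', ['bcd', 'ab', 'a'], 1)
--     ('bcd', 4)
--     >>> whitespace.consume_any('abcdef', ['bcd', 'ab', 'a'], 4)
--     Traceback (most recent call last):
--       File "<stdin>", line 1, in <module>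
--       File "whitespace.py", line 185, in consume_any
--         raise ValueError('no match found in %r for %r' % (code_part, choices))
--     ValueError: no match found in 'ef' for ['bcd', 'ab', 'a']
--     """
--
--     if len(code) <= offset:
--         raise ValueError('tried to consume from empty string')
--
--     max_len = max(len(x) for x in choices)
--
--     code_part = code[offset:]
--
--     for pos in range(max_len+1):
--         if code_part[:pos] in choices:
--             return (code_part[:pos], offset+pos)
--
--     raise ValueError('no match found in %r for %r' % (code_part, choices))
-- ===== SOURCE B (Python) =====
-- def consume_any(code, choices, offset=0):
--     if len(code) <= offset:
--         raise ValueError('tried to consume from empty string')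
--     code_part = code[offset:]
--     cands = [c for c in choices if code_part.startswith(c)]
--     if not cands:
--         raise ValueError('no match found in %r for %r' % (code_part, choices))
--     best = min(cands, key=len)
--     return (best, offset + len(best))
-- ===== Notes on version B (the rewrite author's own statement) =====
-- stated objective: idiomatic
-- what changed: A scans prefix lengths 0..max(len(choices)) and tests each prefix for membership in choices; B filters the choices down to those that are prefixes of code[offset:] and returns the shortest one via min(key=len), so the max-length pass and the prefix-length loop disappear.
import Mathlib
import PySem

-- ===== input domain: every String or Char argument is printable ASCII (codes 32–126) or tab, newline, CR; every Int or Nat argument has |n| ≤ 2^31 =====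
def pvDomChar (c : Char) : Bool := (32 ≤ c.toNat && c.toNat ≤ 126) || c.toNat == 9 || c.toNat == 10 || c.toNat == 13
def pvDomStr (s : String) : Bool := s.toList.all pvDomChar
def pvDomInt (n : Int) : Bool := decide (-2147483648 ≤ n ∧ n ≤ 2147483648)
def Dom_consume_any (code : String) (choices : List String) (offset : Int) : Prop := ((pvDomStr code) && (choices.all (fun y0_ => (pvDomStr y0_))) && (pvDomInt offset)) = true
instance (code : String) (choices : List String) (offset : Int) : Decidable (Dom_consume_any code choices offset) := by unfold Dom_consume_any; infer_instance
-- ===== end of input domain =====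

-- B re-implements A's prefix-length scan as a filter over the choices plus min-by-length; equivalence of return values proved on all inputs where A returns.

-- ===== PORT A =====
-- A's 'for pos in range(max_len+1)' loop: try each prefix length in order, return at the first hit.
def consumeLoopA (cp : List Char) (choices : List String) (offset : Int) : List Int → String × Int
  | [] => ("", -1)  -- loop fell through: Python raises ValueError (excluded by Pre_)
  | pos :: rest =>
      let pref := String.ofList (PySem.List.slice cp none (some pos))  -- code_part[:pos]
      if choices.contains pref then (pref, offset + pos)
      else consumeLoopA cp choices offset rest

def consume_any (code : String) (choices : List String) (offset : Int) : String × Int :=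
  if (code.toList.length : Int) ≤ offset then ("", -1)  -- Python: raise ValueError (excluded by Pre_)
  else
    match PySem.List.max? (choices.map (fun x => x.toList.length)) (fun n => n) with
    | none => ("", -1)  -- max() over an empty generator raises ValueError (excluded by Pre_)
    | some max_len =>
      let code_part := PySem.List.slice code.toList (some offset) none  -- code[offset:]
      consumeLoopA code_part choices offset (PySem.List.pyRange 0 ((max_len : Int) + 1))

-- ===== PORT B =====
def consume_any_alt (code : String) (choices : List String) (offset : Int) : String × Int :=
  if (code.toList.length : Int) ≤ offset then ("", -1)  -- raise (excluded by Pre_)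
  else
    let code_part := PySem.List.slice code.toList (some offset) none
    let cands := choices.filter (fun c => PySem.Chars.startswith code_part c.toList)
    match PySem.List.min? cands (fun c => c.toList.length) with
    | none => ("", -1)  -- raise ValueError (excluded by Pre_)
    | some best => (best, offset + (best.toList.length : Int))

-- ===== PRECONDITION & SPEC =====
-- Pre_ = exactly where Python A returns: offset below len(code), and some choice is a prefix of code[offset:]
-- (otherwise A raises ValueError; with empty choices, max() raises).
def Pre_consume_any (code : String) (choices : List String) (offset : Int) : Prop :=
  offset < (code.toList.length : Int) ∧
  ∃ c ∈ choices, PySem.Chars.startswith (PySem.List.slice code.toList (some offset) none) c.toList = true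
instance (code : String) (choices : List String) (offset : Int) : Decidable (Pre_consume_any code choices offset) := by unfold Pre_consume_any; infer_instance

def pvWitness_consume_any : String × List String × Int := ("abcdef", ["bcd", "ab", "a"], 1)

def Spec_consume_any (code : String) (choices : List String) (offset : Int) (out : String × Int) : Prop := out = consume_any_alt code choices offset
instance (code : String) (choices : List String) (offset : Int) (out : String × Int) : Decidable (Spec_consume_any code choices offset out) := by unfold Spec_consume_any; infer_instance

-- ===== CLAIM (what is proved, stated in full; the proofs are below) =====
def Claim_equal_consume_any : Prop := ∀ (code : String) (choices : List String) (offset : Int), Dom_consume_any code choices offset → Pre_consume_any code choices offset → Spec_consume_any code choices offset (consume_any code choices offset)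

-- ===== LEMMAS AND PROOFS =====

-- min over a nonempty list is some (PySem.List.min?/max? are foldl's over an Option accumulator)
lemma foldlOpt_ne_none {α κ : Type} [LT κ] [DecidableLT κ] (key : α → κ) :
    ∀ (t : List α) (a : α),
      t.foldl (fun acc x => match acc with
        | none => some x
        | some m => if key x < key m then some x else some m) (some a) ≠ none := by
  intro t
  induction t with
  | nil => intro a; simp
  | cons x t ih =>
      intro a
      simp only [List.foldl_cons]
      by_cases h : key x < key a <;> simp only [h, if_true, if_false] <;> first
        | exact ih x
        | exact ih a

-- same fact for the max? accumulator (comparison the other way round)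
lemma foldlOptMax_ne_none {α κ : Type} [LT κ] [DecidableLT κ] (key : α → κ) :
    ∀ (t : List α) (a : α),
      t.foldl (fun acc x => match acc with
        | none => some x
        | some m => if key m < key x then some x else some m) (some a) ≠ none := by
  intro t
  induction t with
  | nil => intro a; simp
  | cons x t ih =>
      intro a
      simp only [List.foldl_cons]
      by_cases h : key a < key x <;> simp only [h, if_true, if_false] <;> first
        | exact ih x
        | exact ih a

-- A's loop skips every position where the prefix is not a choice.
lemma consumeLoopA_skip (cp : List Char) (choices : List String) (offset : Int)
    (l1 l2 : List Int)
    (h : ∀ pos ∈ l1, choices.contains (String.ofList (PySem.List.slice cp none (some pos))) = false) :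
    consumeLoopA cp choices offset (l1 ++ l2) = consumeLoopA cp choices offset l2 := by
  induction l1 with
  | nil => rfl
  | cons p t ih =>
      have hp := h p (by simp)
      simp only [List.cons_append, consumeLoopA, hp, Bool.false_eq_true, if_false]
      exact ih (fun pos hm => h pos (by simp [hm]))

-- unfolding B on an input satisfying Pre_'s shape
lemma alt_eq (code : String) (choices : List String) (offset : Int) (best : String)
    (h1 : ¬ ((code.toList.length : Int) ≤ offset))
    (hmin : PySem.List.min?
        (choices.filter (fun c => PySem.Chars.startswith (PySem.List.slice code.toList (some offset) none) c.toList))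
        (fun c => c.toList.length) = some best) :
    consume_any_alt code choices offset = (best, offset + (best.toList.length : Int)) := by
  simp only [consume_any_alt, if_neg h1, hmin]

-- ===== VERDICT =====
theorem consume_any_spec : Claim_equal_consume_any := by
  intro code choices offset _hdom hpre
  unfold Spec_consume_any
  obtain ⟨hlt, c, hc, hsw⟩ := hpre
  have h1 : ¬ ((code.toList.length : Int) ≤ offset) := by omega
  set cp : List Char := PySem.List.slice code.toList (some offset) none with hcp
  set cands : List String := choices.filter (fun c => PySem.Chars.startswith cp c.toList) with hm
  -- cands is nonempty, so min? returns some best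
  have hcm : c ∈ cands := by
    rw [hm]; exact List.mem_filter.mpr ⟨hc, hsw⟩
  obtain ⟨best, hmin⟩ : ∃ b, PySem.List.min? cands (fun c => c.toList.length) = some b := by
    cases hml : cands with
    | nil => rw [hml] at hcm; simp at hcm
    | cons a t =>
        cases hb : PySem.List.min? (a :: t) (fun c => c.toList.length) with
        | none =>
            exfalso
            apply foldlOpt_ne_none (fun c : String => c.toList.length) t a
            simpa [PySem.List.min?] using hb
        | some b => exact ⟨b, rfl⟩
  have hbm : best ∈ cands := PySem.List.min?_mem hmin
  have hbc : best ∈ choices := List.mem_of_mem_filter hbm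
  have hbsw : PySem.Chars.startswith cp best.toList = true := (List.mem_filter.mp hbm).2
  have hbpre : best.toList <+: cp := (PySem.Chars.startswith_iff cp best.toList).mp hbsw
  set L : Nat := best.toList.length with hL
  have htake : cp.take L = best.toList := (List.prefix_iff_eq_take.mp hbpre).symm
  -- max? returns some max_len, and L ≤ max_len
  obtain ⟨max_len, hmax⟩ : ∃ m, PySem.List.max? (choices.map (fun x => x.toList.length)) (fun n => n) = some m := by
    cases hch : choices with
    | nil => rw [hch] at hc; simp at hc
    | cons a t =>
        cases hb : PySem.List.max? ((a :: t).map (fun x => x.toList.length)) (fun n => n) with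
        | none =>
            exfalso
            apply foldlOptMax_ne_none (fun n : Nat => n) (t.map (fun x => x.toList.length)) a.toList.length
            simpa [PySem.List.max?] using hb
        | some m => exact ⟨m, rfl⟩
  have hLle : L ≤ max_len :=
    PySem.List.max?_isMax hmax L (List.mem_map.mpr ⟨best, hbc, rfl⟩)
  -- positions below L all fail
  have hfail : ∀ j : Nat, j < L →
      choices.contains (String.ofList (PySem.List.slice cp none (some (j : Int)))) = false := by
    intro j hj
    rw [PySem.List.slice_to_natCast]
    by_cases hmem : String.ofList (cp.take j) ∈ choices
    case neg => simp [hmem]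
    exfalso
    have hsw' : PySem.Chars.startswith cp (String.ofList (cp.take j)).toList = true := by
      rw [String.toList_ofList]
      exact (PySem.Chars.startswith_iff _ _).mpr (List.take_prefix j cp)
    have hinm : String.ofList (cp.take j) ∈ cands := by
      rw [hm]; exact List.mem_filter.mpr ⟨hmem, hsw'⟩
    have := PySem.List.min?_isMin hmin _ hinm
    simp only [String.toList_ofList, List.length_take] at this
    rw [← hL] at this
    omega
  -- decompose the range
  have hsplit : List.range (max_len + 1) = List.range L ++ (L :: (List.range (max_len - L)).map (fun k => L + 1 + k)) := by
    have h1 : max_len + 1 = L + (1 + (max_len - L)) := by omega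
    rw [h1, List.range_add, List.range_add]
    simp [List.range_one, List.map_map, Function.comp_def]
    omega
  -- reduce A
  have hA : consume_any code choices offset = (best, offset + (L : Int)) := by
    simp only [consume_any, if_neg h1, hmax, ← hcp]
    have hcast : ((max_len : Int) + 1) = (((max_len + 1 : Nat)) : Int) := by push_cast; ring
    rw [hcast, PySem.List.pyRange_zero_natCast, hsplit]
    rw [List.map_append]
    rw [consumeLoopA_skip _ _ _ _ _ (by
      intro pos hpos
      obtain ⟨j, hj, rfl⟩ := List.mem_map.mp hpos
      exact hfail j (List.mem_range.mp hj))]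
    simp only [List.map_cons, consumeLoopA]
    rw [PySem.List.slice_to_natCast, htake]
    have hbco : choices.contains best = true := List.contains_iff_mem.mpr hbc
    have : String.ofList best.toList = best := String.ofList_toList
    rw [this, hbco]
    simp
  rw [hA, alt_eq code choices offset best h1 (by rw [← hcp, ← hm]; exact hmin)]
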